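-- pv_equiv track=rewrite | github.com/mdshoaibuddinchanda/air-quality-anomaly-benchmark | src/data_pipeline/preprocess.py | find_missing_runs
-- ===== SOURCE A (Python) =====
-- def find_missing_runs(values: list[float | None]) -> list[tuple[int, int, int]]:
--     runs: list[tuple[int, int, int]] = []
--     n_values = len(values)
--     idx = 0
--
--     while idx < n_values:
--         if values[idx] is not None:
--             idx += 1
--             continue
--
--         start = idx
--         while idx < n_values and values[idx] is None:
--             idx += 1
--         end = idx - 1
--         runs.append((start, end, end - start + 1))
--
--     return runs
-- ===== SOURCE B (Python) =====
-- def find_missing_runs(values):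
--     runs = []
--     start = None
--     for i, v in enumerate(values):
--         if v is None:
--             if start is None:
--                 start = i
--         elif start is not None:
--             runs.append((start, i - 1, i - start))
--             start = None
--     if start is not None:
--         runs.append((start, len(values) - 1, len(values) - start))
--     return runs
-- ===== Notes on version B (the rewrite author's own statement) =====
-- stated objective: simpler
-- what changed: Replaced the two-pointer nested while loops with a single enumerate pass keeping an optional run-start accumulator, flushed when a run ends or at the end of the list.
import Mathlib
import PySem

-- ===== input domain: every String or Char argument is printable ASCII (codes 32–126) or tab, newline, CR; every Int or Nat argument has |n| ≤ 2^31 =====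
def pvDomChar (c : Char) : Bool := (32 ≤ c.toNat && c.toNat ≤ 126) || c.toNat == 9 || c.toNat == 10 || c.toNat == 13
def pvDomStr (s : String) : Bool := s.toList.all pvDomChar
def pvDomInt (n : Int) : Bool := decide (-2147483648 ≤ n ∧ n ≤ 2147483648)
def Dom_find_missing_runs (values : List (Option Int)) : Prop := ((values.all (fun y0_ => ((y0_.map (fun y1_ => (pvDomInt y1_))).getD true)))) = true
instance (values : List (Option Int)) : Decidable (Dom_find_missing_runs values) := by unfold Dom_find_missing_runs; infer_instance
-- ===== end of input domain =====

-- B replaces A's two-pointer nested while loops by a single enumerate pass with an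
-- optional run-start accumulator (objective: simpler decomposition, same O(n) cost).

-- ===== PORT A =====
-- inner while: skip the leading None values, returning the stopping index and the remaining list
def pvSkipNone : List (Option Int) → Int → Int × List (Option Int)
  | none :: rest, i => pvSkipNone rest (i + 1)
  | l, i => (i, l)

theorem pvSkipNone_length : ∀ (l : List (Option Int)) (i : Int), (pvSkipNone l i).2.length ≤ l.length
  | [], _ => by simp [pvSkipNone]
  | some x :: rest, i => by simp [pvSkipNone]
  | none :: rest, i => by
      simpa [pvSkipNone] using Nat.le_succ_of_le (pvSkipNone_length rest (i + 1))

-- outer while over the remaining list with the current index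
def pvRunsA : List (Option Int) → Int → List (Int × Int × Int)
  | [], _ => []
  | some _ :: rest, i => pvRunsA rest (i + 1)
  | none :: rest, i =>
      let p := pvSkipNone rest (i + 1)
      (i, p.1 - 1, p.1 - 1 - i + 1) :: pvRunsA p.2 p.1
termination_by l => l.length
decreasing_by
  all_goals simp only [List.length_cons]
  · omega
  · have h := pvSkipNone_length rest (i + 1)
    omega

def find_missing_runs (values : List (Option Int)) : List (Int × Int × Int) :=
  pvRunsA values 0

-- ===== PORT B =====
-- loop body of B's for-loop: state = (runs so far, optional start of the current None run)
def pvStepB (st : List (Int × Int × Int) × Option Int) (p : Int × Option Int) :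
    List (Int × Int × Int) × Option Int :=
  match p.2, st.2 with
  | none, none => (st.1, some p.1)
  | none, some s => (st.1, some s)
  | some _, some s => (st.1 ++ [(s, p.1 - 1, p.1 - s)], none)
  | some _, none => st

def find_missing_runs_alt (values : List (Option Int)) : List (Int × Int × Int) :=
  let st := (PySem.List.enumerate values).foldl pvStepB ([], none)
  match st.2 with
  | none => st.1
  | some s => st.1 ++ [(s, (values.length : Int) - 1, (values.length : Int) - s)]

-- ===== PRECONDITION & SPEC =====
def Spec_find_missing_runs (values : List (Option Int)) (out : List (Int × Int × Int)) : Prop := out = find_missing_runs_alt values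
instance (values : List (Option Int)) (out : List (Int × Int × Int)) : Decidable (Spec_find_missing_runs values out) := by unfold Spec_find_missing_runs; infer_instance

-- ===== CLAIM (what is proved, stated in full; the proofs are below) =====
def Claim_equal_find_missing_runs : Prop := ∀ (values : List (Option Int)), Dom_find_missing_runs values → Spec_find_missing_runs values (find_missing_runs values)

-- ===== LEMMAS AND PROOFS =====

-- the final flush of B, parametrised by the index just past the processed part
def pvFinish (e : Int) (st : List (Int × Int × Int) × Option Int) : List (Int × Int × Int) :=
  match st.2 with
  | none => st.1
  | some s => st.1 ++ [(s, e - 1, e - s)]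

-- joint loop invariant: from a "no open run" state (L1) resp. an "open run started at s"
-- state (L2), B's fold over the remaining list produces A's remaining runs.
theorem pvMain : ∀ (l : List (Option Int)),
    (∀ (i : Int) (acc : List (Int × Int × Int)),
      pvFinish (i + l.length) ((PySem.List.enumerate l i).foldl pvStepB (acc, none)) =
        acc ++ pvRunsA l i) ∧
    (∀ (i s : Int) (acc : List (Int × Int × Int)),
      pvFinish (i + l.length) ((PySem.List.enumerate l i).foldl pvStepB (acc, some s)) =
        acc ++ (s, (pvSkipNone l i).1 - 1, (pvSkipNone l i).1 - s) ::
          pvRunsA (pvSkipNone l i).2 (pvSkipNone l i).1)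
  | [] => by
      constructor
      · intro i acc; simp [PySem.List.enumerate, pvFinish, pvRunsA]
      · intro i s acc; simp [PySem.List.enumerate, pvFinish, pvRunsA, pvSkipNone]
  | some v :: rest => by
      obtain ⟨ih1, ih2⟩ := pvMain rest
      constructor
      · intro i acc
        rw [PySem.List.enumerate_cons]
        simp only [List.foldl_cons, pvStepB, List.length_cons]
        rw [show (i + ((rest.length + 1 : Nat) : Int)) = (i + 1) + rest.length by push_cast; ring,
          ih1]
        simp [pvRunsA]
      · intro i s acc
        rw [PySem.List.enumerate_cons]
        simp only [List.foldl_cons, pvStepB, List.length_cons]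
        rw [show (i + ((rest.length + 1 : Nat) : Int)) = (i + 1) + rest.length by push_cast; ring,
          ih1]
        simp [pvSkipNone, pvRunsA, List.append_assoc]
  | none :: rest => by
      obtain ⟨ih1, ih2⟩ := pvMain rest
      constructor
      · intro i acc
        rw [PySem.List.enumerate_cons]
        simp only [List.foldl_cons, pvStepB, List.length_cons]
        rw [show (i + ((rest.length + 1 : Nat) : Int)) = (i + 1) + rest.length by push_cast; ring,
          ih2]
        simp only [pvRunsA]
        rw [show (pvSkipNone rest (i + 1)).1 - 1 - i + 1 = (pvSkipNone rest (i + 1)).1 - i from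
          by ring]
      · intro i s acc
        rw [PySem.List.enumerate_cons]
        simp only [List.foldl_cons, pvStepB, List.length_cons]
        rw [show (i + ((rest.length + 1 : Nat) : Int)) = (i + 1) + rest.length by push_cast; ring,
          ih2]
        simp [pvSkipNone]

theorem find_missing_runs_spec : Claim_equal_find_missing_runs := by
  intro values _
  unfold Spec_find_missing_runs find_missing_runs find_missing_runs_alt
  have h := (pvMain values).1 0 []
  simpa [pvFinish] using h.symm
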